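-- pv_equiv track=rewrite | github.com/Mayer-04/logica-python | ejercicios/range/ejercicio_1.py | generate_asc_ladder_2
-- ===== SOURCE A (Python) =====
-- def generate_asc_ladder_2(levels: int) -> str:
--     ladder = ""
--
--     for i in range(1, levels + 1):
--         line = ""
--         for _ in range(i):
--             line += "*"
--         ladder += line + "\n"
--
--     return ladder
-- ===== SOURCE B (Python) =====
-- def generate_asc_ladder_2(levels: int) -> str:
--     ladder = ""
--     line = ""
--     for _ in range(levels):
--         line += "*"
--         ladder += line + "\n"
--     return ladder
-- ===== Notes on version B (the rewrite author's own statement) =====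
-- stated objective: faster
-- what changed: Single loop that carries the previous row forward and extends it by one star, instead of rebuilding each row from scratch with a nested loop.
import Mathlib
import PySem

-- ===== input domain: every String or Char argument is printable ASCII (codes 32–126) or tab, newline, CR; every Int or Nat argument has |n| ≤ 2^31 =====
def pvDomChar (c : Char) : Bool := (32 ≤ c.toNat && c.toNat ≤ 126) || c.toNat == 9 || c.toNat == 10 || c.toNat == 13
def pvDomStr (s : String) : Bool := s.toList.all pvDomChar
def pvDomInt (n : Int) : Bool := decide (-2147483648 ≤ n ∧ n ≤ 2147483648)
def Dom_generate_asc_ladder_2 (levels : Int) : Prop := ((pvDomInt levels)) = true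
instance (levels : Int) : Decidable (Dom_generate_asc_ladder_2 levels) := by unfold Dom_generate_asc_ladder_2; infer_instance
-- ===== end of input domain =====

-- B replaces A's nested loop by a single loop that carries the previous row and extends it by one star (fewer iterations; same output).

-- ===== PORT A =====
def generate_asc_ladder_2 (levels : Int) : String :=
  (PySem.List.pyRange 1 (levels + 1) 1).foldl
    (fun ladder i =>
      ladder ++ ((PySem.List.pyRange 0 i 1).foldl (fun line _ => line ++ "*") "") ++ "\n") ""

-- ===== PORT B =====
def generate_asc_ladder_2_alt (levels : Int) : String :=
  ((PySem.List.pyRange 0 levels 1).foldl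
    (fun (st : String × String) _ =>
      let line := st.2 ++ "*"
      (st.1 ++ (line ++ "\n"), line)) ("", "")).1

-- ===== PRECONDITION & SPEC =====
def Spec_generate_asc_ladder_2 (levels : Int) (out : String) : Prop := out = generate_asc_ladder_2_alt levels
instance (levels : Int) (out : String) : Decidable (Spec_generate_asc_ladder_2 levels out) := by unfold Spec_generate_asc_ladder_2; infer_instance

-- ===== CLAIM (what is proved, stated in full; the proofs are below) =====
def Claim_equal_generate_asc_ladder_2 : Prop := ∀ (levels : Int), Dom_generate_asc_ladder_2 levels → Spec_generate_asc_ladder_2 levels (generate_asc_ladder_2 levels)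

-- ===== LEMMAS AND PROOFS =====

-- a row of n stars
def stars (n : Nat) : String := String.ofList (List.replicate n '*')

lemma stars_succ (n : Nat) : stars n ++ "*" = stars (n + 1) := by
  simp [stars, List.replicate_succ', String.ofList_append]

-- A's inner loop builds a row of n stars
lemma innerN (n : Nat) (s : String) :
    (List.range n).foldl (fun (line : String) _ => line ++ "*") s = s ++ stars n := by
  induction n with
  | zero => simp [stars]
  | succ n ih => simp [List.range_succ, ih, String.append_assoc, stars_succ]

lemma innerI (i : Int) :
    (PySem.List.pyRange 0 i 1).foldl (fun (line : String) _ => line ++ "*") "" = stars i.toNat := by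
  rw [PySem.List.pyRange_one, List.foldl_map]
  simpa using innerN (i - 0).toNat ""

-- row k (0-based) of the ladder
def ladderRow (k : Nat) : String := stars (k + 1) ++ "\n"

lemma A_eq (levels : Int) :
    generate_asc_ladder_2 levels
      = (List.range levels.toNat).foldl (fun lad k => lad ++ ladderRow k) "" := by
  unfold generate_asc_ladder_2
  rw [PySem.List.pyRange_one, List.foldl_map]
  have h0 : (levels + 1 - 1).toNat = levels.toNat := by omega
  rw [h0]
  apply PySem.List.foldl_congr_mem
  intro lad k hk
  rw [innerI]
  have h1 : ((1 : Int) + (k : Int)).toNat = k + 1 := by omega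
  rw [h1, ladderRow, String.append_assoc]

-- one step of B's loop (its body ignores the loop index)
def bstep (st : String × String) : String × String :=
  (st.1 ++ ((st.2 ++ "*") ++ "\n"), st.2 ++ "*")

lemma B_eq (levels : Int) :
    generate_asc_ladder_2_alt levels = (bstep^[levels.toNat] ("", "")).1 := by
  unfold generate_asc_ladder_2_alt
  show ((PySem.List.pyRange 0 levels 1).foldl (fun st _ => bstep st) ("", "")).1 = _
  rw [List.foldl_const bstep ("", "")]
  simp [PySem.List.length_pyRange_one]

-- B's invariant: after n steps the ladder is the first n rows and the carried line is n stars
lemma iter_bstep (n : Nat) :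
    bstep^[n] ("", "") = ((List.range n).foldl (fun lad k => lad ++ ladderRow k) "", stars n) := by
  induction n with
  | zero => simp [stars]
  | succ n ih =>
    rw [Function.iterate_succ_apply', ih]
    simp [bstep, List.range_succ, ladderRow, stars_succ]

-- ===== VERDICT (by name: the statement is the Claim_ definition above) =====
theorem generate_asc_ladder_2_spec : Claim_equal_generate_asc_ladder_2 := by
  intro levels _
  unfold Spec_generate_asc_ladder_2
  rw [A_eq, B_eq, iter_bstep]
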